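-- pv_equiv track=rewrite | github.com/OpenNeptune3D/display_connector | display.py | find_best_thumbnail
-- ===== SOURCE A (Python) =====
-- def find_best_thumbnail(metadata):
--     best_thumbnail = None
--     for thumbnail in metadata["thumbnails"]:
--         if thumbnail["width"] == 160:
--             return thumbnail
--         if best_thumbnail is None or thumbnail["width"] > best_thumbnail["width"]:
--             best_thumbnail = thumbnail
--     return best_thumbnail
-- ===== SOURCE B (Python) =====
-- def find_best_thumbnail(metadata):
--     thumbnails = metadata["thumbnails"]
--     for thumbnail in thumbnails:
--         if thumbnail["width"] == 160:
--             return thumbnail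
--     return max(thumbnails, default=None, key=lambda t: t["width"])
-- ===== Notes on version B (the rewrite author's own statement) =====
-- stated objective: simpler
-- what changed: Replaces the single pass with an interleaved best-so-far accumulator by two plain passes: an early-return scan for width 160, then the builtin max(..., key=..., default=None) over the widths.
import Mathlib
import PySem

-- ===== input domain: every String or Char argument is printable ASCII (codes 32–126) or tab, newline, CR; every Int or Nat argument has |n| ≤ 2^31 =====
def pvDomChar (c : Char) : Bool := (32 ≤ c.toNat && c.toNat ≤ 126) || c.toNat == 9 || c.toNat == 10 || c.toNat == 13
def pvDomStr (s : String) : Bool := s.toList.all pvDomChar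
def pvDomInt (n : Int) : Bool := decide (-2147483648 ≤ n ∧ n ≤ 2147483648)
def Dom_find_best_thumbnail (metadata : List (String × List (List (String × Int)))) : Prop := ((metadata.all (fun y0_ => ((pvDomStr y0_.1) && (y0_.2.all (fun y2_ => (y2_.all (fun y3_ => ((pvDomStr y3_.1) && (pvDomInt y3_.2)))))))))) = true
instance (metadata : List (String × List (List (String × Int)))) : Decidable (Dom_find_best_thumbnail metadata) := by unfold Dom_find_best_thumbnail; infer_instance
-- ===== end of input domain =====

-- B replaces A's single pass with an interleaved best-so-far accumulator by two plain passes: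
-- an early-return scan for width 160, then Python's builtin max with a width key (default=None).
-- Equivalence is about the RETURN value; neither program mutates its argument.

-- thumbnail["width"], read as a dict lookup; total form .getD 0 is only relied on under Pre_
def pvWidth? (t : List (String × Int)) : Option Int := (PySem.Dict.mk t).get? "width"

-- ===== PORT A =====
def pvFindA : List (List (String × Int)) → Option (List (String × Int)) → Option (List (String × Int))
  | [], best => best
  | t :: rest, best =>
    if (pvWidth? t).getD 0 = 160 then some t
    else
      match best with
      | none => pvFindA rest (some t)
      | some b =>
        if (pvWidth? t).getD 0 > (pvWidth? b).getD 0 then pvFindA rest (some t)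
        else pvFindA rest best

def find_best_thumbnail (metadata : List (String × List (List (String × Int)))) : Option (List (String × Int)) :=
  pvFindA ((PySem.Dict.mk metadata).getD "thumbnails" []) none

-- ===== PORT B =====
def pvFind160 : List (List (String × Int)) → Option (List (String × Int))
  | [] => none
  | t :: rest => if (pvWidth? t).getD 0 = 160 then some t else pvFind160 rest

def find_best_thumbnail_alt (metadata : List (String × List (List (String × Int)))) : Option (List (String × Int)) :=
  match pvFind160 ((PySem.Dict.mk metadata).getD "thumbnails" []) with
  | some t => some t
  | none =>
    PySem.List.max? ((PySem.Dict.mk metadata).getD "thumbnails" []) (fun t => (pvWidth? t).getD 0)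

-- ===== PRECONDITION & SPEC =====
-- Python A raises KeyError when "thumbnails" is missing, or when a scanned thumbnail
-- (one before and including the first of width 160, or any if none has width 160) lacks "width".
def pvScanOk : List (List (String × Int)) → Bool
  | [] => true
  | t :: rest =>
    match pvWidth? t with
    | none => false
    | some w => w == 160 || pvScanOk rest

def Pre_find_best_thumbnail (metadata : List (String × List (List (String × Int)))) : Prop :=
  (PySem.Dict.mk metadata).contains "thumbnails" = true ∧
  pvScanOk ((PySem.Dict.mk metadata).getD "thumbnails" []) = true

instance (metadata : List (String × List (List (String × Int)))) : Decidable (Pre_find_best_thumbnail metadata) := by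
  unfold Pre_find_best_thumbnail; infer_instance

def pvWitness_find_best_thumbnail : (List (String × List (List (String × Int)))) :=
  [("thumbnails", [[("width", 20)], [("width", 30)]])]

def Spec_find_best_thumbnail (metadata : List (String × List (List (String × Int)))) (out : Option (List (String × Int))) : Prop := out = find_best_thumbnail_alt metadata
instance (metadata : List (String × List (List (String × Int)))) (out : Option (List (String × Int))) : Decidable (Spec_find_best_thumbnail metadata out) := by unfold Spec_find_best_thumbnail; infer_instance

-- ===== CLAIM (what is proved, stated in full; the proofs are below) =====
def Claim_equal_find_best_thumbnail : Prop := ∀ (metadata : List (String × List (List (String × Int)))), Dom_find_best_thumbnail metadata → Pre_find_best_thumbnail metadata → Spec_find_best_thumbnail metadata (find_best_thumbnail metadata)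

-- ===== LEMMAS AND PROOFS =====

-- the fold step of Python's max(…, key=width): keep the first maximal element
def pvStep (acc : Option (List (String × Int))) (x : List (String × Int)) :
    Option (List (String × Int)) :=
  match acc with
  | none => some x
  | some m => if (pvWidth? m).getD 0 < (pvWidth? x).getD 0 then some x else some m

lemma pvMax?_eq (xs : List (List (String × Int))) :
    PySem.List.max? xs (fun t => (pvWidth? t).getD 0) = xs.foldl pvStep none := by
  unfold PySem.List.max?
  apply List.foldl_ext
  intro acc x _
  cases acc <;> rfl

-- A's loop equals: the early-160 scan, else the running-max fold from the same accumulator.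
lemma pvFindA_eq (ts : List (List (String × Int)))
    (acc : Option (List (String × Int))) :
    pvFindA ts acc =
      match pvFind160 ts with
      | some t => some t
      | none => ts.foldl pvStep acc := by
  induction ts generalizing acc with
  | nil => simp [pvFindA, pvFind160]
  | cons t rest ih =>
    by_cases h : (pvWidth? t).getD 0 = 160
    · simp [pvFindA, pvFind160, h]
    · cases acc with
      | none => simp [pvFindA, pvFind160, pvStep, h, ih]
      | some b =>
        simp only [pvFindA, pvFind160, h, if_false, List.foldl_cons, ih]
        by_cases h2 : (pvWidth? b).getD 0 < (pvWidth? t).getD 0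
        · simp [pvStep, gt_iff_lt, h2]
        · simp [pvStep, gt_iff_lt, h2]

-- ===== VERDICT =====
theorem find_best_thumbnail_spec : Claim_equal_find_best_thumbnail := by
  intro metadata _ _
  unfold Spec_find_best_thumbnail find_best_thumbnail
  rw [pvFindA_eq]
  cases hc : pvFind160 ((PySem.Dict.mk metadata).getD "thumbnails" []) with
  | some t => simp [find_best_thumbnail_alt, hc]
  | none => simp [find_best_thumbnail_alt, hc, pvMax?_eq]
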